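-- pv_equiv track=rewrite | github.com/Shafin-Thiyam/FlipkartLaptopsaleEDA | arr_zero.py | summing
-- ===== SOURCE A (Python) =====
-- def summing(N):
--     sumNum=0
--     lst=list()
--     for i in range(N):
--         if(i+1==N):
--             lst.append(-sumNum)
--         else:
--             sumNum+=i
--             lst.append(i)
--     return lst
-- ===== SOURCE B (Python) =====
-- def summing(N):
--     if N < 1:
--         return []
--     return list(range(N - 1)) + [-((N - 1) * (N - 2) // 2)]
-- ===== Notes on version B (the rewrite author's own statement) =====
-- stated objective: simpler
-- what changed: Replaced the accumulating loop with a closed form: the prefix is range(N-1) and the last element is the negated triangular number -((N-1)*(N-2)//2) computed directly.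
import Mathlib
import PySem

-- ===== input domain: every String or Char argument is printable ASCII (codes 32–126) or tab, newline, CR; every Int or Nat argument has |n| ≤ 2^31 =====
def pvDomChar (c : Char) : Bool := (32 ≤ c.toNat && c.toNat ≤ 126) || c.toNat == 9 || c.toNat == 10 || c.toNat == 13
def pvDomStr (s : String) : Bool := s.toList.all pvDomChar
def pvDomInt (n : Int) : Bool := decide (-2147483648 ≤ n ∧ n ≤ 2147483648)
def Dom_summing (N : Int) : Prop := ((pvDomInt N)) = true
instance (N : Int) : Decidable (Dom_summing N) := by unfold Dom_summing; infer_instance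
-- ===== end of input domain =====

-- B replaces A's accumulating loop by range(N-1) plus a directly computed closed-form last element (simpler).

-- ===== PORT A =====
-- loop body of A: carries (sumNum, lst) across range(N)
def summingStep (N : Int) (st : Int × List Int) (i : Int) : Int × List Int :=
  if i + 1 == N then (st.1, st.2 ++ [-st.1]) else (st.1 + i, st.2 ++ [i])

def summing (N : Int) : List Int :=
  ((PySem.List.pyRange 0 N 1).foldl (summingStep N) ((0 : Int), ([] : List Int))).2

-- ===== PORT B =====
def summing_alt (N : Int) : List Int :=
  if N < 1 then []
  else PySem.List.pyRange 0 (N - 1) 1 ++ [-(PySem.Int.floordiv ((N - 1) * (N - 2)) 2)]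

-- ===== PRECONDITION & SPEC =====
def Spec_summing (N : Int) (out : List Int) : Prop := out = summing_alt N
instance (N : Int) (out : List Int) : Decidable (Spec_summing N out) := by unfold Spec_summing; infer_instance

-- ===== CLAIM (what is proved, stated in full; the proofs are below) =====
def Claim_equal_summing : Prop := ∀ (N : Int), Dom_summing N → Spec_summing N (summing N)

-- ===== LEMMAS AND PROOFS =====

-- the loop takes the else-branch on every element that is not N-1
lemma summing_foldl_else (N : Int) (l : List Int) (h : ∀ i ∈ l, i + 1 ≠ N)
    (s : Int) (acc : List Int) :
    l.foldl (summingStep N) (s, acc) = (s + l.sum, acc ++ l) := by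
  induction l generalizing s acc with
  | nil => simp
  | cons a t ih =>
    have ha : a + 1 ≠ N := h a (by simp)
    simp only [List.foldl_cons, summingStep, beq_iff_eq, if_neg ha]
    rw [ih (fun i hi => h i (by simp [hi]))]
    simp [add_assoc]

lemma sum_pyRange_zero_aux : ∀ (n : Nat) (m : Int), m.toNat = n → 0 ≤ m →
    (PySem.List.pyRange 0 m 1).sum * 2 = m * (m - 1) := by
  intro n
  induction n with
  | zero =>
    intro m hmn hm
    have : m = 0 := by omega
    subst this
    simp [PySem.List.pyRange_one_eq_nil (by omega : (0:Int) ≤ 0)]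
  | succ k ih =>
    intro m hmn hm
    have h1 : (1 : Int) ≤ m := by omega
    have hsplit : PySem.List.pyRange 0 m 1 = PySem.List.pyRange 0 (m - 1) 1 ++ [m - 1] := by
      have := PySem.List.pyRange_one_succ_right (a := 0) (b := m - 1) (by omega)
      simpa using this
    have ihm := ih (m - 1) (by omega) (by omega)
    rw [hsplit]
    simp only [List.sum_append, List.sum_cons, List.sum_nil, add_zero]
    linear_combination ihm

lemma sum_pyRange_zero (m : Int) (hm : 0 ≤ m) :
    (PySem.List.pyRange 0 m 1).sum * 2 = m * (m - 1) := by
  exact sum_pyRange_zero_aux m.toNat m rfl hm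

-- ===== VERDICT (by name: the statement is the Claim_ definition above) =====
theorem summing_spec : Claim_equal_summing := by
  intro N _
  unfold Spec_summing summing summing_alt
  by_cases hN : N < 1
  · rw [PySem.List.pyRange_one_eq_nil (by omega)]
    simp [hN]
  · rw [if_neg hN]
    have h1 : (1 : Int) ≤ N := by omega
    have hsplit : PySem.List.pyRange 0 N 1 = PySem.List.pyRange 0 (N - 1) 1 ++ [N - 1] := by
      have := PySem.List.pyRange_one_succ_right (a := 0) (b := N - 1) (by omega)
      simpa using this
    rw [hsplit, List.foldl_append]
    rw [summing_foldl_else N _ (fun i hi => by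
          have := (PySem.List.mem_pyRange_one).1 hi
          omega) 0 []]
    have hlast : (N - 1) + 1 = N := by omega
    simp only [List.foldl_cons, List.foldl_nil, summingStep, beq_iff_eq, hlast,
      zero_add, List.nil_append]
    have hsum : (PySem.List.pyRange 0 (N - 1) 1).sum * 2 = (N - 1) * (N - 2) := by
      have := sum_pyRange_zero (N - 1) (by omega)
      linarith [this]
    have : PySem.Int.floordiv ((N - 1) * (N - 2)) 2 = (PySem.List.pyRange 0 (N - 1) 1).sum := by
      rw [← hsum]
      simp [PySem.Int.floordiv, Int.mul_fdiv_cancel _ (by norm_num : (2:Int) ≠ 0)]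
    rw [this]
    simp
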